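-- pv_equiv track=rewrite | github.com/Itaiporat/backgammon_AI_itai | evaluation.py | is_game_closed
-- ===== SOURCE A (Python) =====
-- WHITE_START_IDX = 1
--
-- BLACK_START_IDX = 24
--
-- def is_game_closed(board):
--     sub_lst = board[WHITE_START_IDX: BLACK_START_IDX+1]  # Extract subarray from index 1 to 24
--     found_positive = False  # Flag to track if we've encountered a negative number
--
--     for num in sub_lst:
--         if num > 0:
--             found_positive = True  # After this, all numbers must be negative
--         elif num < 0 and found_positive:
--             return False  # Found a positive number after a negative -> invalid order
--
--     return True  # If we never find a positive after a negative, return True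
-- ===== SOURCE B (Python) =====
-- def is_game_closed(board):
--     signs = [1 if x > 0 else -1 for x in board[1:25] if x != 0]
--     return signs == sorted(signs)
-- ===== Notes on version B (the rewrite author's own statement) =====
-- stated objective: simpler
-- what changed: Replaces A's stateful flag scan with a declarative build-then-compare: project the nonzero slice entries to a +/-1 sign list and test that it equals its sorted version (all -1s before all 1s iff no positive precedes a negative).
import Mathlib
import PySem

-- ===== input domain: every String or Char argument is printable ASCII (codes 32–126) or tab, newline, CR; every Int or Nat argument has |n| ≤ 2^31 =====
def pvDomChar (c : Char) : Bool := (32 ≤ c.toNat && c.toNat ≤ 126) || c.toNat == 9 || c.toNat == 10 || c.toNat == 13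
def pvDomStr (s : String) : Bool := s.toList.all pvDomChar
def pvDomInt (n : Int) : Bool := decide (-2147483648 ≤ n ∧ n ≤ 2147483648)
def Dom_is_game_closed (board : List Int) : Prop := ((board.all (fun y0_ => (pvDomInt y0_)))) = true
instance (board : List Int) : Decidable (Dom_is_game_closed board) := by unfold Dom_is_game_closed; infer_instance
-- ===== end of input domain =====

-- B: projects the nonzero slice entries to a ±1 sign list and compares it with its sorted version, instead of A's flag scan.
-- ===== PORT A =====
-- the 'for num in sub_lst' loop with the found_positive flag and early 'return False'
def isGameClosedLoopA : List Int → Bool → Bool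
  | [], _ => true
  | num :: rest, found_positive =>
    if num > 0 then isGameClosedLoopA rest true
    else if num < 0 && found_positive then false
    else isGameClosedLoopA rest found_positive

def is_game_closed (board : List Int) : Bool :=
  isGameClosedLoopA (PySem.List.slice board (some 1) (some 25)) false

-- ===== PORT B =====
-- Source B's sign-list comprehension (filter nonzero, map to ±1), then 'signs == sorted(signs)'
def is_game_closed_alt (board : List Int) : Bool :=
  let signs := ((PySem.List.slice board (some 1) (some 25)).filter
      (fun x => decide (x ≠ 0))).map (fun x => if x > 0 then (1 : Int) else -1)
  signs == PySem.List.sorted signs (fun x => x) false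

-- ===== PRECONDITION & SPEC =====
def Spec_is_game_closed (board : List Int) (out : Bool) : Prop := out = is_game_closed_alt board
instance (board : List Int) (out : Bool) : Decidable (Spec_is_game_closed board out) := by unfold Spec_is_game_closed; infer_instance

-- ===== CLAIM (what is proved, stated in full; the proofs are below) =====
def Claim_equal_is_game_closed : Prop := ∀ (board : List Int), Dom_is_game_closed board → Spec_is_game_closed board (is_game_closed board)

-- ===== LEMMAS AND PROOFS =====
-- the sign list B builds from a list
def signsOf (l : List Int) : List Int :=
  (l.filter (fun x => decide (x ≠ 0))).map (fun x => if x > 0 then (1 : Int) else -1)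

theorem signs_mem (l : List Int) (y : Int) (hy : y ∈ signsOf l) : y = 1 ∨ y = -1 := by
  unfold signsOf at hy
  rcases List.mem_map.1 hy with ⟨x, _, hx⟩
  by_cases h : x > 0 <;> simp [h] at hx <;> omega

theorem signs_cons_pos (x : Int) (l : List Int) (h : x > 0) :
    signsOf (x :: l) = 1 :: signsOf l := by
  unfold signsOf; simp [show x ≠ 0 by omega, h]

theorem signs_cons_neg (x : Int) (l : List Int) (h : x < 0) :
    signsOf (x :: l) = -1 :: signsOf l := by
  unfold signsOf; simp [show x ≠ 0 by omega, show ¬ x > 0 by omega]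

theorem signs_cons_zero (l : List Int) : signsOf (0 :: l) = signsOf l := by
  unfold signsOf; simp

theorem pairwise_of_all_one (t : List Int) (h : ∀ y ∈ t, y = 1) :
    t.Pairwise (· ≤ ·) := by
  induction t with
  | nil => exact List.Pairwise.nil
  | cons x rest ih =>
    refine List.Pairwise.cons (fun y hy => ?_) (ih fun y hy => h y (List.mem_cons_of_mem _ hy))
    rw [h x List.mem_cons_self, h y (List.mem_cons_of_mem _ hy)]

theorem all_nonneg_eq_signs_one (l : List Int) :
    (l.all (fun y => decide (y ≥ 0))) = decide (∀ y ∈ signsOf l, y = 1) := by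
  induction l with
  | nil => simp [signsOf]
  | cons x rest ih =>
    rcases lt_trichotomy x 0 with hx | hx | hx
    · rw [signs_cons_neg x rest hx]
      simp [show ¬ x ≥ 0 by omega]
    · subst hx; rw [signs_cons_zero]; simpa using ih
    · rw [signs_cons_pos x rest hx]
      simp only [List.all_cons, show decide (x ≥ 0) = true by simp; omega, Bool.true_and, ih]
      simp only [List.mem_cons, forall_eq_or_imp, true_and]
theorem loopA_true_eq_all (l : List Int) :
    isGameClosedLoopA l true = l.all (fun y => decide (y ≥ 0)) := by
  induction l with
  | nil => rfl
  | cons x rest ih =>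
    simp only [isGameClosedLoopA, List.all_cons]
    by_cases hx : x > 0
    · simp [hx, ih]; omega
    · by_cases hn : x < 0
      · simp [hx, hn]
      · simp [hx, hn, ih, show (0:Int) ≤ x by omega]

theorem loopA_eq_pairwise (l : List Int) :
    isGameClosedLoopA l false = decide ((signsOf l).Pairwise (· ≤ ·)) := by
  induction l with
  | nil => simp [isGameClosedLoopA, signsOf]
  | cons x rest ih =>
    rcases lt_trichotomy x 0 with hx | hx | hx
    · rw [signs_cons_neg x rest hx]
      simp only [isGameClosedLoopA, show ¬ x > 0 by omega, if_false,
        show (decide (x < 0) && false) = false by simp, if_neg Bool.false_ne_true, ih]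
      rw [decide_eq_decide]
      refine ⟨fun h => List.Pairwise.cons (fun y hy => ?_) h, fun h => h.tail⟩
      rcases signs_mem rest y hy with h1 | h1 <;> simp [h1]
    · subst hx
      rw [signs_cons_zero]
      simpa [isGameClosedLoopA] using ih
    · rw [signs_cons_pos x rest hx]
      simp only [isGameClosedLoopA, if_pos hx, loopA_true_eq_all, all_nonneg_eq_signs_one]
      rw [decide_eq_decide]
      refine ⟨fun h => List.Pairwise.cons (fun y hy => ?_) (pairwise_of_all_one _ h), fun h y hy => ?_⟩
      · rw [h y hy]
      · rcases signs_mem rest y hy with h1 | h1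
        · exact h1
        · exfalso
          have := (List.pairwise_cons.1 h).1 y hy
          rw [h1] at this; norm_num at this

-- ===== VERDICT (by name: the statement is the Claim_ definition above) =====
theorem is_game_closed_spec : Claim_equal_is_game_closed := by
  intro board _
  unfold Spec_is_game_closed is_game_closed is_game_closed_alt
  rw [loopA_eq_pairwise]
  set s := signsOf (PySem.List.slice board (some 1) (some 25)) with hs
  have hsu : ((PySem.List.slice board (some 1) (some 25)).filter
      (fun x => decide (x ≠ 0))).map (fun x => if x > 0 then (1 : Int) else -1) = s := rfl
  simp only [hsu]
  by_cases hp : s.Pairwise (· ≤ ·)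
  · rw [PySem.List.sorted_eq_self_of_pairwise s (fun x => x) (by simpa using hp)]
    simp [hp]
  · simp only [decide_eq_false hp]
    symm
    rw [beq_eq_false_iff_ne]
    intro he
    exact hp (by rw [he]; simpa using PySem.List.sorted_pairwise s (fun x => x))
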